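-- pv_equiv track=rewrite | github.com/ahgraber/AIMLbling-about | content/blog/how-robust-are-llms-to-typos/experiment/github_typos.py | get_edit_chunk
-- ===== SOURCE A (Python) =====
-- def get_edit_chunk(string: str, op: str, op_start: int, op_end: int):
--     """Extract the minimal number of words required to represent an edit operation."""
--     spaces = [0, *[i for i, _char in enumerate(string) if _char == " "], len(string)]
--
--     if op != "equal" and " " in string[op_start:op_end]:
--         op_start = max(0, op_start - 1)
--         op_end = min(op_end + 1, len(string))
--
--     start = max(s for s in spaces if s <= op_start)
--     end = min(s for s in spaces if s >= op_end)
--     return string[start:end].strip()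
-- ===== SOURCE B (Python) =====
-- def get_edit_chunk(string: str, op: str, op_start: int, op_end: int):
--     """Extract the minimal number of words required to represent an edit operation."""
--     n = len(string)
--     if op != "equal" and " " in string[op_start:op_end]:
--         op_start = max(0, op_start - 1)
--         op_end = min(op_end + 1, n)
--
--     if op_start >= n:
--         start = n
--     else:
--         start = op_start
--         while start > 0 and string[start] != " ":
--             start -= 1
--
--     if op_end <= 0:
--         end = 0
--     else:
--         end = op_end
--         while end < n and string[end] != " ":
--             end += 1
--
--     return string[start:end].strip()
-- ===== Notes on version B (the rewrite author's own statement) =====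
-- stated objective: idiomatic
-- what changed: A materializes the full list of all space positions plus sentinels and filters it twice with max()/min() generator scans; B drops that list entirely and instead walks left from op_start to the nearest space and right from op_end to the next space, with the 0/len boundary fallbacks made explicit.
import Mathlib
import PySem

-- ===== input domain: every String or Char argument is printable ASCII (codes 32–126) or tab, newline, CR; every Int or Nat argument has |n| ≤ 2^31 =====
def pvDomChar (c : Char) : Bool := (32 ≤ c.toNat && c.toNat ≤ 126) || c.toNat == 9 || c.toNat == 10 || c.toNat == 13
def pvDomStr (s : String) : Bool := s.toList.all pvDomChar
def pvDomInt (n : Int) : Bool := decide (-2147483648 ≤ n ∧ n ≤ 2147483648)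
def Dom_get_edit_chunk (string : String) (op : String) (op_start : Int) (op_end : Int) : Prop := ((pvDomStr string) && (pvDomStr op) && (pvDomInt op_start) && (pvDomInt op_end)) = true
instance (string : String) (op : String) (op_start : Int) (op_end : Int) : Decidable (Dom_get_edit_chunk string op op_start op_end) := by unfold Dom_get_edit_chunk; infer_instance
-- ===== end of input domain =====

-- B replaces A's materialized list of all space positions and its max/min generator scans
-- by two direct boundary scans from the edit offsets (idiomatic; no asymptotic change claimed).
-- Neither implementation mutates its arguments.

-- ===== PORT A =====
def get_edit_chunk (string : String) (op : String) (op_start : Int) (op_end : Int) : String :=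
  let cs := string.toList
  -- spaces = [0, *[i for i, _char in enumerate(string) if _char == " "], len(string)]
  let spaces : List Int :=
    0 :: ((PySem.List.enumerate cs).filter (fun p => p.2 == ' ')).map (fun p => p.1)
      ++ [(cs.length : Int)]
  let se : Int × Int :=
    if (!(op == "equal")) && PySem.Str.isIn " " (PySem.Str.slice string (some op_start) (some op_end)) then
      (max 0 (op_start - 1), min (op_end + 1) (cs.length : Int))
    else (op_start, op_end)
  -- start = max(s for s in spaces if s <= op_start)  (Python max raises on an empty generator: excluded by Pre_)
  let start : Int := (PySem.List.max? (spaces.filter (fun s => decide (s ≤ se.1))) (fun x => x)).getD 0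
  -- end = min(s for s in spaces if s >= op_end)
  let stop : Int := (PySem.List.min? (spaces.filter (fun s => decide (se.2 ≤ s))) (fun x => x)).getD 0
  PySem.Str.strip (PySem.Str.slice string (some start) (some stop))

-- ===== PORT B =====
-- while start > 0 and string[start] != " ": start -= 1
def leftScan (cs : List Char) : Nat → Nat
  | 0 => 0
  | i + 1 => if cs.getD (i + 1) ' ' == ' ' then i + 1 else leftScan cs i

-- while end < n and string[end] != " ": end += 1
def rightScan (cs : List Char) (i : Nat) : Nat :=
  if h : i < cs.length then
    (if cs[i] == ' ' then i else rightScan cs (i + 1))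
  else i
termination_by cs.length - i

def get_edit_chunk_alt (string : String) (op : String) (op_start : Int) (op_end : Int) : String :=
  let cs := string.toList
  let n : Int := cs.length
  let se : Int × Int :=
    if (!(op == "equal")) && PySem.Str.isIn " " (PySem.Str.slice string (some op_start) (some op_end)) then
      (max 0 (op_start - 1), min (op_end + 1) n)
    else (op_start, op_end)
  -- the while-loop body never runs when start ≤ 0; a negative start is kept as-is
  let start : Int := if n ≤ se.1 then n else if se.1 < 0 then se.1 else (leftScan cs se.1.toNat : Int)
  let stop : Int := if se.2 ≤ 0 then 0 else (rightScan cs se.2.toNat : Int)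
  PySem.Str.strip (PySem.Str.slice string (some start) (some stop))

-- ===== PRECONDITION & SPEC =====
-- Pre_ excludes exactly the inputs where A raises ValueError (max()/min() over an empty
-- generator): those where the widening branch does not fire and op_start < 0 or op_end > len(string).
def Pre_get_edit_chunk (string : String) (op : String) (op_start : Int) (op_end : Int) : Prop :=
  ((!(op == "equal")) && PySem.Str.isIn " " (PySem.Str.slice string (some op_start) (some op_end))) = true
  ∨ (0 ≤ op_start ∧ op_end ≤ (string.toList.length : Int))
instance (string : String) (op : String) (op_start : Int) (op_end : Int) : Decidable (Pre_get_edit_chunk string op op_start op_end) := by unfold Pre_get_edit_chunk; infer_instance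

def pvWitness_get_edit_chunk : String × String × Int × Int := ("hello world", "replace", 3, 7)

def Spec_get_edit_chunk (string : String) (op : String) (op_start : Int) (op_end : Int) (out : String) : Prop := out = get_edit_chunk_alt string op op_start op_end
instance (string : String) (op : String) (op_start : Int) (op_end : Int) (out : String) : Decidable (Spec_get_edit_chunk string op op_start op_end out) := by unfold Spec_get_edit_chunk; infer_instance

-- ===== CLAIM (what is proved, stated in full; the proofs are below) =====
def Claim_equal_get_edit_chunk : Prop := ∀ (string : String) (op : String) (op_start : Int) (op_end : Int), Dom_get_edit_chunk string op op_start op_end → Pre_get_edit_chunk string op op_start op_end → Spec_get_edit_chunk string op op_start op_end (get_edit_chunk string op op_start op_end)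

-- ===== LEMMAS AND PROOFS =====
def spacesOf (cs : List Char) : List Int :=
  0 :: ((PySem.List.enumerate cs).filter (fun p => p.2 == ' ')).map (fun p => p.1)
    ++ [(cs.length : Int)]

lemma mem_spacesOf {cs : List Char} {s : Int} :
    s ∈ spacesOf cs ↔ s = 0 ∨ s = (cs.length : Int) ∨
      ∃ k : Nat, ∃ h : k < cs.length, cs[k] = ' ' ∧ s = (k : Int) := by
  simp [spacesOf, PySem.List.mem_enumerate_iff, List.mem_filter]
  constructor
  · rintro (h | ⟨k, rfl, hk, hc⟩ | h)
    · exact Or.inl h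
    · exact Or.inr (Or.inr ⟨k, ⟨hk, hc⟩, rfl⟩)
    · exact Or.inr (Or.inl h)
  · rintro (h | h | ⟨k, ⟨hk, hc⟩, rfl⟩)
    · exact Or.inl h
    · exact Or.inr (Or.inr h)
    · exact Or.inr (Or.inl ⟨k, rfl, hk, hc⟩)

lemma max?_eq_of_mem_of_le (l : List Int) (m : Int) (hm : m ∈ l) (hle : ∀ x ∈ l, x ≤ m) :
    PySem.List.max? l (fun x => x) = some m := by
  cases h : PySem.List.max? l (fun x => x) with
  | none =>
      rw [PySem.List.max?_eq_none_iff] at h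
      subst h; cases hm
  | some m' =>
      have h1 := PySem.List.max?_mem h
      have h2 := PySem.List.max?_isMax h
      exact congrArg some (le_antisymm (hle m' h1) (h2 m hm))

lemma min?_eq_of_mem_of_le (l : List Int) (m : Int) (hm : m ∈ l) (hle : ∀ x ∈ l, m ≤ x) :
    PySem.List.min? l (fun x => x) = some m := by
  cases h : PySem.List.min? l (fun x => x) with
  | none =>
      rw [PySem.List.min?_eq_none_iff] at h
      subst h; cases hm
  | some m' =>
      have h1 := PySem.List.min?_mem h
      have h2 := PySem.List.min?_isMin h
      exact congrArg some (le_antisymm (h2 m hm) (hle m' h1))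

lemma leftScan_le (cs : List Char) (i : Nat) : leftScan cs i ≤ i := by
  induction i with
  | zero => simp [leftScan]
  | succ i ih =>
      simp only [leftScan]
      split
      · exact le_refl _
      · exact le_trans ih (Nat.le_succ i)

lemma leftScan_prop (cs : List Char) (i : Nat) (h : i < cs.length) :
    leftScan cs i = 0 ∨ cs[leftScan cs i]? = some ' ' := by
  induction i with
  | zero => exact Or.inl rfl
  | succ i ih =>
      simp only [leftScan]
      split
      · rename_i hg
        refine Or.inr ?_
        rw [List.getElem?_eq_getElem h]
        have : cs.getD (i+1) ' ' = cs[i+1] := List.getD_eq_getElem cs ' ' h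
        simp only [beq_iff_eq] at hg
        rw [← this, hg]
      · exact ih (Nat.lt_of_succ_lt h)

lemma leftScan_ge (cs : List Char) (i : Nat) :
    ∀ j ≤ i, (j = 0 ∨ cs[j]? = some ' ') → j ≤ leftScan cs i := by
  induction i with
  | zero => intro j hj _; omega
  | succ i ih =>
      intro j hj hsp
      simp only [leftScan]
      split
      · exact hj
      · rename_i hg
        rcases Nat.lt_or_ge j (i+1) with hlt | hge
        · exact ih j (by omega) hsp
        · exfalso
          have hj1 : j = i + 1 := by omega
          rw [hj1] at hsp
          rcases hsp with h0 | hsome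
          · omega
          · simp [List.getD_eq_getElem?_getD, hsome] at hg

lemma rightScan_ge (cs : List Char) (i : Nat) : i ≤ rightScan cs i := by
  fun_induction rightScan with
  | case1 => exact le_refl _
  | case2 i h hns ih => omega
  | case3 => exact le_refl _

lemma rightScan_prop (cs : List Char) (i : Nat) (h : i ≤ cs.length) :
    rightScan cs i = cs.length ∨ cs[rightScan cs i]? = some ' ' := by
  fun_induction rightScan with
  | case1 i hlt hsp =>
      refine Or.inr ?_
      rw [List.getElem?_eq_getElem hlt]
      simp only [beq_iff_eq] at hsp
      rw [hsp]
  | case2 i hlt hns ih => exact ih (by omega)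
  | case3 i hge => exact Or.inl (by omega)

lemma rightScan_min (cs : List Char) (i : Nat) :
    ∀ j, i ≤ j → (j = cs.length ∨ cs[j]? = some ' ') → rightScan cs i ≤ j := by
  fun_induction rightScan with
  | case1 i hlt hsp => intro j hij _; exact hij
  | case2 i hlt hns ih =>
      intro j hij hsp
      refine ih j ?_ hsp
      rcases Nat.lt_or_ge i j with h | h
      · omega
      · exfalso
        have hji : j = i := by omega
        rw [hji] at hsp
        rcases hsp with h0 | hsome
        · omega
        · have := (List.getElem?_eq_some_iff.mp hsome).2
          simp [this] at hns
  | case3 i hge => intro j hij _; exact hij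

lemma startEq (cs : List Char) (a : Int) (ha : 0 ≤ a) :
    (PySem.List.max? ((spacesOf cs).filter (fun s => decide (s ≤ a))) (fun x => x)).getD 0
      = if (cs.length : Int) ≤ a then (cs.length : Int)
        else if a < 0 then a else (leftScan cs a.toNat : Int) := by
  rw [if_neg (by omega : ¬ a < 0)]
  split
  · rename_i hna
    rw [max?_eq_of_mem_of_le _ (cs.length : Int)]
    · rfl
    · rw [List.mem_filter]
      exact ⟨mem_spacesOf.mpr (Or.inr (Or.inl rfl)), by simpa using hna⟩
    · intro x hx
      rw [List.mem_filter] at hx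
      rcases mem_spacesOf.mp hx.1 with h0 | hn | ⟨k, hk, _, rfl⟩
      · omega
      · omega
      · omega
  · rename_i hna
    have halt : a.toNat < cs.length := by omega
    have hcast : (a.toNat : Int) = a := by omega
    rw [max?_eq_of_mem_of_le _ (leftScan cs a.toNat : Int)]
    · rfl
    · rw [List.mem_filter]
      constructor
      · rcases leftScan_prop cs a.toNat halt with h0 | hsome
        · exact mem_spacesOf.mpr (Or.inl (by exact_mod_cast h0))
        · exact mem_spacesOf.mpr (Or.inr (Or.inr
            ⟨leftScan cs a.toNat, (List.getElem?_eq_some_iff.mp hsome).1,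
             (List.getElem?_eq_some_iff.mp hsome).2, rfl⟩))
      · have := leftScan_le cs a.toNat
        simp only [decide_eq_true_eq]
        omega
    · intro x hx
      rw [List.mem_filter] at hx
      have hxa : x ≤ a := by simpa using hx.2
      rcases mem_spacesOf.mp hx.1 with h0 | hn | ⟨k, hk, hc, rfl⟩
      · omega
      · omega
      · have hka : k ≤ a.toNat := by omega
        have := leftScan_ge cs a.toNat k hka
          (Or.inr (List.getElem?_eq_some_iff.mpr ⟨hk, hc⟩))
        omega

lemma stopEq (cs : List Char) (b : Int) (hb : b ≤ (cs.length : Int)) :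
    (PySem.List.min? ((spacesOf cs).filter (fun s => decide (b ≤ s))) (fun x => x)).getD 0
      = if b ≤ 0 then 0 else (rightScan cs b.toNat : Int) := by
  split
  · rename_i hb0
    rw [min?_eq_of_mem_of_le _ 0]
    · rfl
    · rw [List.mem_filter]
      exact ⟨mem_spacesOf.mpr (Or.inl rfl), by simpa using hb0⟩
    · intro x hx
      rw [List.mem_filter] at hx
      rcases mem_spacesOf.mp hx.1 with h0 | hn | ⟨k, hk, _, rfl⟩
      · omega
      · omega
      · omega
  · rename_i hb0
    have hblt : b.toNat ≤ cs.length := by omega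
    have hcast : (b.toNat : Int) = b := by omega
    rw [min?_eq_of_mem_of_le _ (rightScan cs b.toNat : Int)]
    · rfl
    · rw [List.mem_filter]
      constructor
      · rcases rightScan_prop cs b.toNat hblt with hn | hsome
        · exact mem_spacesOf.mpr (Or.inr (Or.inl (by exact_mod_cast hn)))
        · exact mem_spacesOf.mpr (Or.inr (Or.inr
            ⟨rightScan cs b.toNat, (List.getElem?_eq_some_iff.mp hsome).1,
             (List.getElem?_eq_some_iff.mp hsome).2, rfl⟩))
      · have := rightScan_ge cs b.toNat
        simp only [decide_eq_true_eq]
        omega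
    · intro x hx
      rw [List.mem_filter] at hx
      have hbx : b ≤ x := by simpa using hx.2
      rcases mem_spacesOf.mp hx.1 with h0 | hn | ⟨k, hk, hc, rfl⟩
      · omega
      · have := rightScan_min cs b.toNat cs.length (by omega) (Or.inl rfl)
        omega
      · have := rightScan_min cs b.toNat k (by omega)
          (Or.inr (List.getElem?_eq_some_iff.mpr ⟨hk, hc⟩))
        omega


-- ===== VERDICT (by name: the statement is the Claim_ definition above) =====
theorem get_edit_chunk_spec : Claim_equal_get_edit_chunk := by
  intro string op op_start op_end _ hpre
  unfold Pre_get_edit_chunk at hpre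
  unfold Spec_get_edit_chunk get_edit_chunk get_edit_chunk_alt
  by_cases hc : ((!(op == "equal")) && PySem.Str.isIn " " (PySem.Str.slice string (some op_start) (some op_end))) = true
  · simp only [hc, if_true]
    congr 2
    · exact congrArg some (startEq string.toList (max 0 (op_start - 1)) (le_max_left _ _))
    · exact congrArg some (stopEq string.toList (min (op_end + 1) (string.toList.length : Int)) (min_le_right _ _))
  · have hr : 0 ≤ op_start ∧ op_end ≤ (string.toList.length : Int) := hpre.resolve_left hc
    simp only [hc, if_false, Bool.false_eq_true]
    congr 2
    · exact congrArg some (startEq string.toList op_start hr.1)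
    · exact congrArg some (stopEq string.toList op_end hr.2)
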